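-- pv_equiv track=rewrite | github.com/lawfullyillegal-droid/observer-patch-holography | tools/build_pdf.py | _fix_line_broken_braces
-- ===== SOURCE A (Python) =====
-- def _fix_line_broken_braces(line):
--     r"""Fix a single line with broken $...\} patterns."""
--     i = 0
--     result = []
--     while i < len(line):
--         if line[i] == '$':
--             # Find the next $ (or end of line)
--             j = line.find('$', i + 1)
--             if j == -1:
--                 # Unclosed math - check if there's \} that should close it
--                 segment = line[i:]
--                 # Try to fix: replace \} with } and add closing $
--                 if '\\}' in segment and '_{' in segment:
--                     segment = segment.replace('\\}', '}')
--                     segment += '$'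
--                 result.append(segment)
--                 break
--             else:
--                 result.append(line[i:j + 1])
--                 i = j + 1
--         else:
--             result.append(line[i])
--             i += 1
--     return ''.join(result)
-- ===== SOURCE B (Python) =====
-- def _fix_line_broken_braces(line):
--     r"""Fix a single line with broken $...\} patterns."""
--     if line.count('$') % 2 == 0:
--         # every '$' pairs up with the next one, so A copies the line verbatim
--         return line
--     idx = line.rfind('$')
--     segment = line[idx:]
--     if '\\}' in segment and '_{' in segment:
--         segment = segment.replace('\\}', '}') + '$'
--     return line[:idx] + segment
-- ===== Notes on version B (the rewrite author's own statement) =====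
-- stated objective: faster
-- what changed: B replaces A's char-by-char scanning loop (which appends every character/segment to a list and joins) with a direct computation: if the '$' count is even the line is returned unchanged, otherwise the fix is applied to the suffix starting at the last '$' (rfind).
import Mathlib
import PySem

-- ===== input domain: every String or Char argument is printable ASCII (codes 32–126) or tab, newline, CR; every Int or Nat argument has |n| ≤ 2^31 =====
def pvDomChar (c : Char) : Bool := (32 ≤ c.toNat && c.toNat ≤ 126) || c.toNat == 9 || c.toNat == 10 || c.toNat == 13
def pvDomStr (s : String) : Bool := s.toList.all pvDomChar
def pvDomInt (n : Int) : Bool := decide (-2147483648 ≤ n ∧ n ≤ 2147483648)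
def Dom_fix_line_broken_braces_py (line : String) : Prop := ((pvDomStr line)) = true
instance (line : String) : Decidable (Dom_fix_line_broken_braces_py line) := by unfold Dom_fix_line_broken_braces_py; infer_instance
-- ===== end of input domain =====

-- B changes the algorithm: instead of A's scanning loop it returns the line unchanged when the
-- '$' count is even and otherwise fixes the suffix after the last '$'; same result, simpler.

-- ===== PORT A =====
-- shared segment fix (both Pythons contain literally this code on the unclosed segment):
-- '\\}' in segment   (two-character substring test, exact)
def pvHasBMA : List Char → Bool
  | '\\' :: '}' :: _ => true
  | _ :: rest => pvHasBMA rest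
  | [] => false

-- '_{' in segment
def pvHasUBA : List Char → Bool
  | '_' :: '{' :: _ => true
  | _ :: rest => pvHasUBA rest
  | [] => false

-- segment.replace('\\}', '}')  (left-to-right, non-overlapping, exact)
def pvReplA : List Char → List Char
  | '\\' :: '}' :: rest => '}' :: pvReplA rest
  | c :: rest => c :: pvReplA rest
  | [] => []

-- if '\\}' in segment and '_{' in segment: segment = segment.replace('\\}','}') + '$'
def pvFixSegA (seg : List Char) : List Char :=
  if pvHasBMA seg && pvHasUBA seg then pvReplA seg ++ ['$'] else seg

-- line.find('$', i+1): first '$' in the remainder; some (before, after) with no '$' in before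
def pvFindD : List Char → Option (List Char × List Char)
  | [] => none
  | c :: rest =>
    if c = '$' then some ([], rest)
    else match pvFindD rest with
      | some (p, s) => some (c :: p, s)
      | none => none

theorem pvFindD_len : ∀ (l p s : List Char), pvFindD l = some (p, s) → s.length < l.length := by
  intro l
  induction l with
  | nil => intro p s h; simp [pvFindD] at h
  | cons c rest ih =>
    intro p s h
    by_cases hc : c = '$'
    · simp [pvFindD, hc] at h
      simp [← h.2]
    · simp [pvFindD, hc] at h
      cases hf : pvFindD rest with
      | none => rw [hf] at h; simp at h
      | some ps =>
        rw [hf] at h; simp at h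
        have := ih ps.1 ps.2 (by rw [hf])
        simp [← h.2]; omega

-- the while loop of A, as structural recursion on the remaining characters
def pvLoopA : List Char → List Char
  | [] => []
  | c :: rest =>
    if c = '$' then
      match hf : pvFindD rest with
      | none => pvFixSegA (c :: rest)            -- unclosed math: fix segment, break
      | some (p, s) => (c :: p ++ ['$']) ++ pvLoopA s
    else c :: pvLoopA rest
termination_by l => l.length
decreasing_by
  · have := pvFindD_len rest p s hf; simp; omega
  · simp

def fix_line_broken_braces_py (line : String) : String := String.ofList (pvLoopA line.toList)

-- ===== PORT B =====
-- B's copy of the segment fix (Source B contains literally the same replace/'in' code):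
def pvHasBMB : List Char → Bool
  | '\\' :: '}' :: _ => true
  | _ :: rest => pvHasBMB rest
  | [] => false

def pvHasUBB : List Char → Bool
  | '_' :: '{' :: _ => true
  | _ :: rest => pvHasUBB rest
  | [] => false

def pvReplB : List Char → List Char
  | '\\' :: '}' :: rest => '}' :: pvReplB rest
  | c :: rest => c :: pvReplB rest
  | [] => []

def pvFixSegB (seg : List Char) : List Char :=
  if pvHasBMB seg && pvHasUBB seg then pvReplB seg ++ ['$'] else seg

-- line.rfind('$'): split at the LAST '$': some (before, after) with l = before ++ '$' :: after, no '$' in after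
def pvRSplitD : List Char → Option (List Char × List Char)
  | [] => none
  | c :: rest =>
    match pvRSplitD rest with
    | some (p, s) => some (c :: p, s)
    | none => if c = '$' then some ([], rest) else none

def fix_line_broken_braces_py_alt (line : String) : String :=
  let l := line.toList
  if l.count '$' % 2 = 0 then line
  else
    match pvRSplitD l with
    | some (p, t) => String.ofList (p ++ pvFixSegB ('$' :: t))
    | none => line  -- unreachable: odd count means a '$' exists

-- ===== PRECONDITION & SPEC =====
def Spec_fix_line_broken_braces_py (line : String) (out : String) : Prop := out = fix_line_broken_braces_py_alt line
instance (line : String) (out : String) : Decidable (Spec_fix_line_broken_braces_py line out) := by unfold Spec_fix_line_broken_braces_py; infer_instance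

-- ===== CLAIM (what is proved, stated in full; the proofs are below) =====
def Claim_equal_fix_line_broken_braces_py : Prop := ∀ (line : String), Dom_fix_line_broken_braces_py line → Spec_fix_line_broken_braces_py line (fix_line_broken_braces_py line)

-- ===== LEMMAS AND PROOFS =====

theorem pvHasBM_eq (l : List Char) : pvHasBMA l = pvHasBMB l := by
  induction l using pvHasBMA.induct <;> simp [pvHasBMA, pvHasBMB, *]

theorem pvHasUB_eq (l : List Char) : pvHasUBA l = pvHasUBB l := by
  induction l using pvHasUBA.induct <;> simp [pvHasUBA, pvHasUBB, *]

theorem pvRepl_eq (l : List Char) : pvReplA l = pvReplB l := by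
  induction l using pvReplA.induct <;> simp [pvReplA, pvReplB, *]

theorem pvFixSeg_eq (s : List Char) : pvFixSegA s = pvFixSegB s := by
  simp [pvFixSegA, pvFixSegB, pvHasBM_eq, pvHasUB_eq, pvRepl_eq]

theorem pvLoopA_dollar_none (rest : List Char) (hf : pvFindD rest = none) :
    pvLoopA ('$' :: rest) = pvFixSegA ('$' :: rest) := by
  rw [pvLoopA]
  split
  · split
    · rfl
    · next p' s' heq => rw [hf] at heq; cases heq
  · next hne => exact absurd rfl hne

theorem pvLoopA_dollar_some (rest p s : List Char) (hf : pvFindD rest = some (p, s)) :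
    pvLoopA ('$' :: rest) = ('$' :: p ++ ['$']) ++ pvLoopA s := by
  rw [pvLoopA]
  split
  · split
    · next heq => rw [hf] at heq; cases heq
    · next p' s' heq =>
        rw [hf] at heq
        simp at heq
        simp [← heq.1, ← heq.2]
  · next hne => exact absurd rfl hne


theorem pvFindD_none (l : List Char) (h : pvFindD l = none) : '$' ∉ l := by
  induction l with
  | nil => simp
  | cons c rest ih =>
    by_cases hc : c = '$'
    · simp [pvFindD, hc] at h
    · simp [pvFindD, hc] at h
      cases hf : pvFindD rest with
      | none => simp; exact ⟨fun he => hc he.symm, ih hf⟩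
      | some ps => rw [hf] at h; simp at h

theorem pvFindD_some (l p s : List Char) (h : pvFindD l = some (p, s)) :
    l = p ++ '$' :: s ∧ '$' ∉ p := by
  induction l generalizing p s with
  | nil => simp [pvFindD] at h
  | cons c rest ih =>
    by_cases hc : c = '$'
    · simp [pvFindD, hc] at h
      exact ⟨by simp [h.1, h.2, hc], by simp [h.1]⟩
    · simp [pvFindD, hc] at h
      cases hf : pvFindD rest with
      | none => rw [hf] at h; simp at h
      | some ps =>
        rw [hf] at h; simp at h
        obtain ⟨h1, h2⟩ := ih ps.1 ps.2 (by rw [hf])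
        constructor
        · rw [← h.1, ← h.2]; simp [h1]
        · rw [← h.1]; simp [h2]; exact fun he => hc he.symm

theorem pvRSplitD_none (l : List Char) (h : pvRSplitD l = none) : '$' ∉ l := by
  induction l with
  | nil => simp
  | cons c rest ih =>
    simp only [pvRSplitD] at h
    cases hf : pvRSplitD rest with
    | some ps => rw [hf] at h; simp at h
    | none =>
      rw [hf] at h
      by_cases hc : c = '$'
      · simp [hc] at h
      · simp; exact ⟨fun he => hc he.symm, ih hf⟩

theorem pvRSplitD_some (l p s : List Char) (h : pvRSplitD l = some (p, s)) :
    l = p ++ '$' :: s ∧ '$' ∉ s := by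
  induction l generalizing p s with
  | nil => simp [pvRSplitD] at h
  | cons c rest ih =>
    simp only [pvRSplitD] at h
    cases hf : pvRSplitD rest with
    | some ps =>
      rw [hf] at h; simp at h
      obtain ⟨h1, h2⟩ := ih ps.1 ps.2 (by rw [hf])
      refine ⟨?_, ?_⟩
      · rw [← h.1, ← h.2]; simp [h1]
      · rw [← h.2]; exact h2
    | none =>
      rw [hf] at h
      by_cases hc : c = '$'
      · simp [hc] at h
        simp [← h.1, ← h.2, hc]
        exact pvRSplitD_none rest hf
      · simp [hc] at h

theorem pvRSplitD_mem (l : List Char) (h : '$' ∈ l) : ∃ p s, pvRSplitD l = some (p, s) := by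
  cases hf : pvRSplitD l with
  | none => exact absurd h (pvRSplitD_none l hf)
  | some ps => exact ⟨ps.1, ps.2, by simp [hf]⟩

-- rsplit of x ++ s when s still contains a '$': the last '$' is inside s
theorem pvRSplitD_append (x s p t : List Char) (hs : pvRSplitD s = some (p, t)) :
    pvRSplitD (x ++ s) = some (x ++ p, t) := by
  induction x with
  | nil => simpa using hs
  | cons c xs ih =>
    simp only [List.cons_append, pvRSplitD, ih]

-- A copies every fully paired line verbatim
theorem pvLoopA_even (l : List Char) (h : l.count '$' % 2 = 0) : pvLoopA l = l := by
  induction l using pvLoopA.induct with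
  | case1 => simp [pvLoopA]
  | case2 rest hf =>
    -- leading '$', no further '$': count would be odd, contradiction
    have hn := pvFindD_none rest hf
    have : rest.count '$' = 0 := List.count_eq_zero.mpr hn
    simp [List.count_cons, this] at h
  | case3 rest p s hf ih =>
    obtain ⟨h1, h2⟩ := pvFindD_some rest p s hf
    have hp : p.count '$' = 0 := List.count_eq_zero.mpr h2
    have hcount : rest.count '$' = p.count '$' + 1 + s.count '$' := by
      rw [h1]; simp [List.count_append, List.count_cons]; ring
    have hs : s.count '$' % 2 = 0 := by
      simp [List.count_cons, hcount, hp] at h; omega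
    rw [pvLoopA_dollar_some rest p s hf, ih hs, h1]
    simp
  | case4 c rest hc ih =>
    have hcnt : rest.count '$' % 2 = 0 := by simpa [List.count_cons, hc] using h
    rw [pvLoopA]; simp [hc, ih hcnt]

-- A on an odd line: verbatim prefix up to the last '$', then the fixed suffix
theorem pvLoopA_odd (l : List Char) (h : l.count '$' % 2 = 1) :
    ∀ p t, pvRSplitD l = some (p, t) → pvLoopA l = p ++ pvFixSegA ('$' :: t) := by
  induction l using pvLoopA.induct with
  | case1 => simp [List.count_nil] at h
  | case2 rest hf =>
    intro p t hr
    have hn := pvFindD_none rest hf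
    have hrs : pvRSplitD rest = none := by
      cases hrs : pvRSplitD rest with
      | none => rfl
      | some ps =>
        obtain ⟨h1, _⟩ := pvRSplitD_some rest ps.1 ps.2 (by rw [hrs])
        exact absurd (by rw [h1]; simp) hn
    simp only [pvRSplitD, hrs, if_pos rfl] at hr
    simp at hr
    rw [pvLoopA_dollar_none rest hf]
    simp [← hr.1, ← hr.2]
  | case3 rest q s hf ih =>
    intro p t hr
    obtain ⟨h1, h2⟩ := pvFindD_some rest q s hf
    have hq : q.count '$' = 0 := List.count_eq_zero.mpr h2
    have hcount : rest.count '$' = q.count '$' + 1 + s.count '$' := by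
      rw [h1]; simp [List.count_append, List.count_cons]; ring
    have hsodd : s.count '$' % 2 = 1 := by
      simp [List.count_cons, hcount, hq] at h; omega
    have hmem : '$' ∈ s := by
      by_contra hn
      have : s.count '$' = 0 := List.count_eq_zero.mpr hn
      omega
    obtain ⟨p', t', hrs⟩ := pvRSplitD_mem s hmem
    have : pvRSplitD ('$' :: rest) = some ('$' :: (q ++ '$' :: p'), t') := by
      have := pvRSplitD_append ('$' :: (q ++ ['$'])) s p' t' hrs
      simpa [h1] using this
    rw [this] at hr
    simp at hr
    rw [pvLoopA_dollar_some rest q s hf, ih hsodd p' t' hrs, ← hr.1, ← hr.2]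
    simp
  | case4 c rest hc ih =>
    intro p t hr
    have hcnt : rest.count '$' % 2 = 1 := by simpa [List.count_cons, hc] using h
    have hmem : '$' ∈ rest := by
      by_contra hn
      have : rest.count '$' = 0 := List.count_eq_zero.mpr hn
      omega
    obtain ⟨p', t', hrs⟩ := pvRSplitD_mem rest hmem
    simp only [pvRSplitD, hrs] at hr
    simp at hr
    rw [pvLoopA]
    simp only [if_neg hc]
    rw [ih hcnt p' t' hrs, ← hr.1, ← hr.2]
    simp

-- ===== VERDICT (by name: the statement is the Claim_ definition above) =====
theorem fix_line_broken_braces_py_spec : Claim_equal_fix_line_broken_braces_py := by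
  intro line _
  unfold Spec_fix_line_broken_braces_py fix_line_broken_braces_py fix_line_broken_braces_py_alt
  by_cases h : line.toList.count '$' % 2 = 0
  · simp only [if_pos h]
    rw [pvLoopA_even _ h]
    exact String.ofList_toList
  · have hodd : line.toList.count '$' % 2 = 1 := by omega
    have hmem : '$' ∈ line.toList := by
      by_contra hn
      have : line.toList.count '$' = 0 := List.count_eq_zero.mpr hn
      omega
    obtain ⟨p, t, hr⟩ := pvRSplitD_mem line.toList hmem
    simp only [if_neg h, hr]
    rw [pvLoopA_odd _ hodd p t hr, pvFixSeg_eq]
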